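-- pv_equiv track=rewrite | github.com/Gandi/gandi-swapsetup | swap_init3.py | _netmask4
-- ===== SOURCE A (Python) =====
-- def _netmask4(cidr):
--     try:
--         bits = int(cidr.split("/")[1])
--         net_bits = (2 ** (bits) - 1) << 32 - bits
--         return ".".join(
--             str((net_bits & (255 << 8 * x)) >> 8 * x) for x in range(3, -1, -1)
--         )
--     except:
--         # fallback
--         return "255.255.255.0"
-- ===== SOURCE B (Python) =====
-- def _netmask4(cidr):
--     try:
--         bits = int(cidr.split("/")[1])
--         if not 0 <= bits <= 32:
--             raise ValueError
--         full, rem = divmod(bits, 8)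
--         octets = [255] * full + ([256 - (1 << (8 - rem))] if rem else [])
--         octets += [0] * (4 - len(octets))
--         return ".".join(map(str, octets))
--     except:
--         return "255.255.255.0"
-- ===== Notes on version B (the rewrite author's own statement) =====
-- stated objective: idiomatic
-- what changed: B validates 0<=bits<=32 explicitly and assembles the four octets arithmetically via divmod(bits,8) ([255]*full plus one partial octet, zero-padded to 4), instead of A's combined 32-bit mask integer with a per-byte shift-and-mask extraction loop.
import Mathlib
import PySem

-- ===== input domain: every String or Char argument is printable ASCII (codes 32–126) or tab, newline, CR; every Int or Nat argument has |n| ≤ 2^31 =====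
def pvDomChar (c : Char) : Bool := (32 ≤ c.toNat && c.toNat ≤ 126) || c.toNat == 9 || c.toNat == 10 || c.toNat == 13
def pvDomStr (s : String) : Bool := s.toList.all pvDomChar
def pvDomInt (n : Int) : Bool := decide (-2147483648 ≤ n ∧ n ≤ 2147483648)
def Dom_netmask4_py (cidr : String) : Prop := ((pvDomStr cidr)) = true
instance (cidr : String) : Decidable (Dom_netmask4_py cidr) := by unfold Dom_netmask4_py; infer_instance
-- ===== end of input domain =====

-- B replaces A's combined 32-bit mask and per-byte extraction loop with a divmod octet assembly (idiomatic decomposition); equivalence is proved for every string.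

-- ===== PORT A =====
-- body of A's try after a successful int(): bits < 0 makes Python's 2**bits a float
-- (TypeError on <<), bits > 32 makes the shift amount negative (ValueError); both are
-- caught by the bare except, hence the range guard selecting the fallback.
def netmaskA_of (bits : Int) : String :=
  if 0 ≤ bits ∧ bits ≤ 32 then
    let netBits : Int := ((2 : Int) ^ bits.toNat - 1) <<< (32 - bits.toNat)
    PySem.Str.join "." ((PySem.List.pyRange 3 (-1) (-1)).map
      (fun x => PySem.Int.toStr ((PySem.Int.band netBits ((255 : Int) <<< (8 * x).toNat)) >>> (8 * x).toNat)))
  else "255.255.255.0"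

-- int(part) then the try body; none = ValueError caught by the bare except
def netmaskA_ofPart (part : String) : String :=
  match PySem.Int.ofStr? part with
  | none => "255.255.255.0"
  | some bits => netmaskA_of bits

-- [1] indexing; none = IndexError caught by the bare except
def netmaskA_get (g : Option String) : String :=
  match g with
  | none => "255.255.255.0"
  | some part => netmaskA_ofPart part

def netmask4_py (cidr : String) : String :=
  match PySem.Str.split? cidr "/" with
  | none => "255.255.255.0"  -- unreachable: the separator "/" is nonempty
  | some parts => netmaskA_get (PySem.List.pyGet? parts 1)

-- ===== PORT B =====
-- body of B's try after a successful int(): explicit range check (ValueError → fallback),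
-- then divmod octet assembly.
def netmaskB_of (bits : Int) : String :=
  if 0 ≤ bits ∧ bits ≤ 32 then
    let full := bits.toNat / 8
    let rem := bits.toNat % 8
    let octets : List Int :=
      List.replicate full 255 ++ (if rem ≠ 0 then [256 - (1 <<< (8 - rem))] else [])
    let octets := octets ++ List.replicate (4 - octets.length) 0
    PySem.Str.join "." (octets.map PySem.Int.toStr)
  else "255.255.255.0"

-- same parse chain, then B's try body
def netmaskB_ofPart (part : String) : String :=
  match PySem.Int.ofStr? part with
  | none => "255.255.255.0"
  | some bits => netmaskB_of bits

def netmaskB_get (g : Option String) : String :=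
  match g with
  | none => "255.255.255.0"
  | some part => netmaskB_ofPart part

def netmask4_py_alt (cidr : String) : String :=
  match PySem.Str.split? cidr "/" with
  | none => "255.255.255.0"  -- unreachable: the separator "/" is nonempty
  | some parts => netmaskB_get (PySem.List.pyGet? parts 1)

-- ===== PRECONDITION & SPEC =====
def Spec_netmask4_py (cidr : String) (out : String) : Prop := out = netmask4_py_alt cidr
instance (cidr : String) (out : String) : Decidable (Spec_netmask4_py cidr out) := by unfold Spec_netmask4_py; infer_instance

-- ===== CLAIM (what is proved, stated in full; the proofs are below) =====
def Claim_equal_netmask4_py : Prop := ∀ (cidr : String), Dom_netmask4_py cidr → Spec_netmask4_py cidr (netmask4_py cidr)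

-- ===== LEMMAS AND PROOFS =====

-- the two post-parse bodies agree on every parsed integer
theorem netmask_of_eq (bits : Int) : netmaskA_of bits = netmaskB_of bits := by
  by_cases h : 0 ≤ bits ∧ bits ≤ 32
  · have key : ∀ n < 33, netmaskA_of ((n : Nat) : Int) = netmaskB_of ((n : Nat) : Int) := by decide
    have hb : bits = ((bits.toNat : Nat) : Int) := (Int.toNat_of_nonneg h.1).symm
    rw [hb]
    exact key bits.toNat (by omega)
  · simp [netmaskA_of, netmaskB_of, h]

-- the parse-then-compute chains agree level by level
theorem netmask_ofPart_eq (part : String) : netmaskA_ofPart part = netmaskB_ofPart part := by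
  unfold netmaskA_ofPart netmaskB_ofPart
  rcases PySem.Int.ofStr? part with _ | bits
  · rfl
  · exact netmask_of_eq bits

theorem netmask_get_eq (g : Option String) : netmaskA_get g = netmaskB_get g := by
  unfold netmaskA_get netmaskB_get
  rcases g with _ | part
  · rfl
  · exact netmask_ofPart_eq part

-- ===== VERDICT (by name: the statement is the Claim_ definition above) =====
theorem netmask4_py_spec : Claim_equal_netmask4_py := by
  intro cidr _
  show netmask4_py cidr = netmask4_py_alt cidr
  unfold netmask4_py netmask4_py_alt
  rcases PySem.Str.split? cidr "/" with _ | parts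
  · rfl
  · exact netmask_get_eq _
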